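-- pv_equiv track=rewrite | github.com/cacaview/py-claw | src/py_claw/services/session_memory/extractor.py | truncate_session_memory_for_compact
-- ===== SOURCE A (Python) =====
-- from typing import TYPE_CHECKING, Any
--
-- MAX_SECTION_LENGTH = 2000
--
-- def truncate_session_memory_for_compact(content: str) -> tuple[str, bool]:
--     """Truncate session memory content for compact operation.
--
--     When inserting session memory into compact messages, we need to
--     ensure it doesn't exceed the per-section token budget.
--
--     Returns:
--         Tuple of (truncated_content, was_truncated)
--     """
--     lines = content.split("\n")
--     max_chars_per_section = MAX_SECTION_LENGTH * 4  # roughTokenCountEstimation uses length/4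
--     output_lines: list[str] = []
--     current_section_lines: list[str] = []
--     current_section_header = ""
--     was_truncated = False
--
--     for line in lines:
--         if line.startswith("# "):
--             result = _flush_session_section(
--                 current_section_header,
--                 current_section_lines,
--                 max_chars_per_section,
--             )
--             output_lines.extend(result["lines"])
--             was_truncated = was_truncated or result["was_truncated"]
--             current_section_header = line
--             current_section_lines = []
--         else:
--             current_section_lines.append(line)
--
--     # Flush the last section
--     result = _flush_session_section(
--         current_section_header,
--         current_section_lines,
--         max_chars_per_section,
--     )
--     output_lines.extend(result["lines"])
--     was_truncated = was_truncated or result["was_truncated"]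
--
--     return "\n".join(output_lines), was_truncated
--
-- def _flush_session_section(
--     section_header: str,
--     section_lines: list[str],
--     max_chars_per_section: int,
-- ) -> dict[str, Any]:
--     """Flush a session section, truncating if necessary."""
--     if not section_header:
--         return {"lines": section_lines, "was_truncated": False}
--
--     section_content = "\n".join(section_lines)
--     if len(section_content) <= max_chars_per_section:
--         return {"lines": [section_header] + section_lines, "was_truncated": False}
--
--     # Truncate at a line boundary near the limit
--     char_count = 0
--     kept_lines = [section_header]
--     for line in section_lines:
--         if char_count + len(line) + 1 > max_chars_per_section:
--             break
--         kept_lines.append(line)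
--         char_count += len(line) + 1
--
--     kept_lines.append("\n[... section truncated for length ...]")
--     return {"lines": kept_lines, "was_truncated": True}
-- ===== SOURCE B (Python) =====
-- MAX_SECTION_LENGTH = 2000
--
-- def truncate_session_memory_for_compact(content):
--     """Index-based: locate headers by position, slice sections, and decide
--     truncation from per-section prefix sums instead of a streaming flush loop."""
--     max_chars = MAX_SECTION_LENGTH * 4
--     lines = content.split("\n")
--     n = len(lines)
--     marks = [(i, line) for i, line in enumerate(lines) if line.startswith("# ")]
--     out = lines[:marks[0][0]] if marks else lines[:]
--     truncated = False
--     for j, (s, header) in enumerate(marks):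
--         e = marks[j + 1][0] if j + 1 < len(marks) else n
--         body = lines[s + 1:e]
--         sums = []
--         acc = 0
--         for line in body:
--             acc += len(line) + 1
--             sums.append(acc)
--         out.append(header)
--         if (sums[-1] - 1 if sums else 0) <= max_chars:
--             out.extend(body)
--         else:
--             keep = sum(1 for v in sums if v <= max_chars)
--             out.extend(body[:keep])
--             out.append("\n[... section truncated for length ...]")
--             truncated = True
--     return "\n".join(out), truncated
-- ===== Notes on version B (the rewrite author's own statement) =====
-- stated objective: alternative
-- what changed: Replaced A's streaming flush-as-you-go state machine (current-header/current-lines buffers plus a dict-returning flush helper whose budget loop breaks per line) by index arithmetic: one enumerate pass records header positions, each section is sliced out of the line list by position, and both the fits-the-budget test and the cut point are read off the section's prefix sums (the cut as a count of prefix sums within budget).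
import Mathlib
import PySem

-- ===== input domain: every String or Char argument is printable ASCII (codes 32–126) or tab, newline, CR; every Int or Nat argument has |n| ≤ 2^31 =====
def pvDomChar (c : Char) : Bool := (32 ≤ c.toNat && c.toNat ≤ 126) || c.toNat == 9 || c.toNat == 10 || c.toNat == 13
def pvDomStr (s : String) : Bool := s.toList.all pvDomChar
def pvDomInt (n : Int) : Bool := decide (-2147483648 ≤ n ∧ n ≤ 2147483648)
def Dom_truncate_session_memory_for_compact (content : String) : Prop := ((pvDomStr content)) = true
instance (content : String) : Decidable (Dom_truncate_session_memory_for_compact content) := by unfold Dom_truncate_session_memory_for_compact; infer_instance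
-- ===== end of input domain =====

-- B replaces A's streaming flush-as-you-go state machine (current-header/current-lines buffers
-- plus a dict-returning flush helper with a budget break-loop) by index arithmetic: it locates
-- the headers by position in one enumerate pass, slices each section out of the line list, and
-- decides truncation and the cut point from the section's prefix sums.  Objective: alternative.

-- ===== PORT A =====
def pvMAX_SECTION_LENGTH : Int := 2000

-- A's truncation loop inside _flush_session_section (with break)
def pvKeepA : List String → Int → Int → List String
  | [], _, _ => []
  | l :: ls, cnt, m =>
    if cnt + PySem.Str.len l + 1 > m then []
    else l :: pvKeepA ls (cnt + PySem.Str.len l + 1) m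

-- _flush_session_section
def pvFlushA (section_header : String) (section_lines : List String) (max_chars : Int) :
    List String × Bool :=
  if section_header == "" then (section_lines, false)
  else
    let section_content := PySem.Str.join "\n" section_lines
    if PySem.Str.len section_content ≤ max_chars then
      (section_header :: section_lines, false)
    else
      (section_header :: pvKeepA section_lines 0 max_chars ++
        ["\n[... section truncated for length ...]"], true)

-- A's main for-loop over lines, state = (output_lines, current_header, current_lines, was_truncated)
def pvLoopA (m : Int) : List String → List String → String → List String → Bool →
    List String × Bool
  | [], out, hdr, cur, t =>
    let r := pvFlushA hdr cur m
    (out ++ r.1, t || r.2)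
  | line :: rest, out, hdr, cur, t =>
    if PySem.Str.startswith line "# " then
      let r := pvFlushA hdr cur m
      pvLoopA m rest (out ++ r.1) line [] (t || r.2)
    else
      pvLoopA m rest out hdr (cur ++ [line]) t

def truncate_session_memory_for_compact (content : String) : String × Bool :=
  let lines := (PySem.Str.split? content "\n").getD []
  let max_chars := pvMAX_SECTION_LENGTH * 4
  let r := pvLoopA max_chars lines [] "" [] false
  (PySem.Str.join "\n" r.1, r.2)

-- ===== PORT B =====
-- marks = [(i, line) for i, line in enumerate(lines) if line.startswith("# ")]
def pvMarks (lines : List String) : List (Int × String) :=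
  (PySem.List.enumerate lines).filterMap
    (fun p => if PySem.Str.startswith p.2 "# " then some p else none)

-- the prefix-sum pass: sums = []; acc = 0; for line in body: acc += len(line) + 1; sums.append(acc)
def pvSums : List String → Int → List Int
  | [], _ => []
  | l :: ls, acc => (acc + (PySem.Str.len l + 1)) :: pvSums ls (acc + (PySem.Str.len l + 1))

-- the per-mark loop: e = next mark index (or n); body = lines[s+1:e]; decide from prefix sums
-- ('sums[-1] - 1 if sums else 0' is the getLast? match; 'sum(1 for v in sums if v <= m)' the 0/1 sum)
def pvSecLoop (lines : List String) (n m : Int) :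
    List (Int × String) → List String → Bool → List String × Bool
  | [], out, t => (out, t)
  | (s, header) :: rest, out, t =>
    let e : Int := match rest with | [] => n | (e', _) :: _ => e'
    let body := PySem.List.slice lines (some (s + 1)) (some e)
    let sums := pvSums body 0
    let total : Int := match sums.getLast? with | some v => v - 1 | none => 0
    if total ≤ m then
      pvSecLoop lines n m rest (out ++ header :: body) t
    else
      let keep : Int := (sums.map (fun v => if v ≤ m then (1 : Int) else 0)).sum
      pvSecLoop lines n m rest
        (out ++ header :: (PySem.List.slice body (some 0) (some keep) ++
          ["\n[... section truncated for length ...]"])) true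

def truncate_session_memory_for_compact_alt (content : String) : String × Bool :=
  let max_chars := pvMAX_SECTION_LENGTH * 4
  let lines := (PySem.Str.split? content "\n").getD []
  let n : Int := lines.length
  let marks := pvMarks lines
  let out0 := match marks with
    | [] => lines
    | (s, _) :: _ => PySem.List.slice lines (some 0) (some s)
  let r := pvSecLoop lines n max_chars marks out0 false
  (PySem.Str.join "\n" r.1, r.2)

-- ===== PRECONDITION & SPEC =====
def Spec_truncate_session_memory_for_compact (content : String) (out : String × Bool) : Prop := out = truncate_session_memory_for_compact_alt content
instance (content : String) (out : String × Bool) : Decidable (Spec_truncate_session_memory_for_compact content out) := by unfold Spec_truncate_session_memory_for_compact; infer_instance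

-- ===== CLAIM (what is proved, stated in full; the proofs are below) =====
def Claim_equal_truncate_session_memory_for_compact : Prop := ∀ (content : String), Dom_truncate_session_memory_for_compact content → Spec_truncate_session_memory_for_compact content (truncate_session_memory_for_compact content)

-- ===== LEMMAS AND PROOFS =====

-- the canonical section decomposition both programs realise: (header?, body) list
def pvToOpt (h : String) : Option String := if h = "" then none else some h

def pvParse : List String → Option String → List String →
    List (Option String × List String)
  | [], h, b => [(h, b)]
  | l :: ls, h, b =>
    if PySem.Str.startswith l "# " then (h, b) :: pvParse ls (some l) []
    else pvParse ls h (b ++ [l])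

def pvEmit (m : Int) (acc : List String × Bool) (sec : Option String × List String) :
    List String × Bool :=
  match sec.1 with
  | none => (acc.1 ++ sec.2, acc.2)
  | some h =>
    if PySem.Str.len (PySem.Str.join "\n" sec.2) ≤ m then
      (acc.1 ++ h :: sec.2, acc.2)
    else
      (acc.1 ++ h :: (pvKeepA sec.2 0 m ++ ["\n[... section truncated for length ...]"]), true)

theorem pvBoolAux {b : Bool} (h : (!b) = true) : b = false := by cases b <;> simp_all

theorem pvBoolAux2 {b : Bool} (h : (!b) = false) : b = true := by cases b <;> simp_all

-- ---- A-side: the streaming loop is the fold of pvEmit over the parse ----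

theorem pvStartswith_ne_empty (l : String) (h : PySem.Str.startswith l "# " = true) :
    l ≠ "" := by
  intro he; subst he; simp [PySem.Str.startswith, PySem.Chars.startswith] at h

theorem pvFlush_emit (h : String) (cur : List String) (m : Int) (acc : List String × Bool) :
    pvEmit m acc (pvToOpt h, cur) =
      (acc.1 ++ (pvFlushA h cur m).1, acc.2 || (pvFlushA h cur m).2) := by
  by_cases he : h = ""
  · subst he; simp [pvEmit, pvFlushA, pvToOpt]
  · simp only [pvToOpt, pvEmit, pvFlushA, beq_iff_eq, if_neg he]
    split_ifs with hle <;> simp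

theorem pvLoop_eq (m : Int) (ls : List String) : ∀ out hdr cur t,
    pvLoopA m ls out hdr cur t =
      (pvParse ls (pvToOpt hdr) cur).foldl (pvEmit m) (out, t) := by
  induction ls with
  | nil =>
    intro out hdr cur t
    simp [pvLoopA, pvParse, pvFlush_emit]
  | cons l ls ih =>
    intro out hdr cur t
    by_cases hs : PySem.Str.startswith l "# " = true
    · have hne : l ≠ "" := pvStartswith_ne_empty l hs
      simp only [pvLoopA, pvParse, hs, List.foldl_cons, if_true]
      rw [ih]
      rw [pvFlush_emit]
      simp [pvToOpt, hne]
    · simp only [pvLoopA, pvParse, hs, Bool.false_eq_true, if_false]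
      exact ih _ _ _ _

-- ---- B-side helpers ----

def pvShift (c : Int) (ms : List (Int × String)) : List (Int × String) :=
  ms.map (fun p => (p.1 + c, p.2))

def pvMarksFrom (ls : List String) (s : Int) : List (Int × String) :=
  (PySem.List.enumerate ls s).filterMap
    (fun p => if PySem.Str.startswith p.2 "# " then some p else none)

theorem pvMarks_eq_from (ls : List String) : pvMarks ls = pvMarksFrom ls 0 := rfl

theorem pvMarksFrom_nil (s : Int) : pvMarksFrom [] s = [] := rfl

theorem pvShift_nil (c : Int) : pvShift c [] = [] := rfl

theorem pvShift_cons (c : Int) (p : Int × String) (ms : List (Int × String)) :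
    pvShift c (p :: ms) = (p.1 + c, p.2) :: pvShift c ms := rfl

theorem pvShift_shift (a b : Int) (ms : List (Int × String)) :
    pvShift a (pvShift b ms) = pvShift (b + a) ms := by
  simp only [pvShift, List.map_map]
  congr 1
  funext p
  simp [add_assoc]

theorem pvMarksFrom_cons (l : String) (ls : List String) (s : Int) :
    pvMarksFrom (l :: ls) s =
      if PySem.Str.startswith l "# " then (s, l) :: pvMarksFrom ls (s + 1)
      else pvMarksFrom ls (s + 1) := by
  simp only [pvMarksFrom, PySem.List.enumerate_cons, List.filterMap_cons]
  split_ifs <;> simp_all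

theorem pvMarksFrom_append_noHdr (pre : List String) :
    ∀ (ls : List String) (s : Int), (∀ l ∈ pre, PySem.Str.startswith l "# " = false) →
    pvMarksFrom (pre ++ ls) s = pvMarksFrom ls (s + pre.length) := by
  induction pre with
  | nil => intro ls s _; simp
  | cons a pre ih =>
    intro ls s hpre
    have ha : PySem.Str.startswith a "# " = false := hpre a (by simp)
    rw [List.cons_append, pvMarksFrom_cons, if_neg (by simp only [ha]; decide),
      ih ls (s + 1) (fun l hl => hpre l (by simp [hl]))]
    congr 1
    simp only [List.length_cons]
    push_cast
    ring

theorem pvMarksFrom_shift (ls : List String) : ∀ (s c : Int),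
    pvMarksFrom ls (s + c) = pvShift c (pvMarksFrom ls s) := by
  induction ls with
  | nil => intro s c; simp [pvMarksFrom_nil, pvShift]
  | cons l ls ih =>
    intro s c
    rw [pvMarksFrom_cons, pvMarksFrom_cons]
    have h1 : s + c + 1 = (s + 1) + c := by ring
    split_ifs with h
    · rw [h1, ih (s + 1) c]; simp [pvShift]
    · rw [h1, ih (s + 1) c]

theorem pvMarksFrom_shift0 (ls : List String) (c : Int) :
    pvMarksFrom ls c = pvShift c (pvMarksFrom ls 0) := by
  have := pvMarksFrom_shift ls 0 c
  rwa [zero_add] at this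

theorem pvMarksFrom_nonneg (ls : List String) : ∀ (s : Int) (p : Int × String),
    p ∈ pvMarksFrom ls s → s ≤ p.1 := by
  induction ls with
  | nil => intro s p hp; simp [pvMarksFrom_nil] at hp
  | cons l ls ih =>
    intro s p hp
    rw [pvMarksFrom_cons] at hp
    split_ifs at hp with h
    · rcases List.mem_cons.mp hp with h1 | h1
      · subst h1; simp
      · have := ih (s + 1) p h1; omega
    · have := ih (s + 1) p hp; omega

theorem pvMarksFrom_eq_nil (ls : List String) (s : Int)
    (h : ∀ l ∈ ls, PySem.Str.startswith l "# " = false) : pvMarksFrom ls s = [] := by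
  have := pvMarksFrom_append_noHdr ls [] s h
  rwa [List.append_nil, pvMarksFrom_nil] at this

-- ---- parse over a header-free prefix ----

theorem pvParse_append_noHdr (pre : List String) :
    ∀ (ls : List String) (h : Option String) (b : List String),
    (∀ l ∈ pre, PySem.Str.startswith l "# " = false) →
    pvParse (pre ++ ls) h b = pvParse ls h (b ++ pre) := by
  induction pre with
  | nil => intro ls h b _; simp
  | cons a pre ih =>
    intro ls h b hpre
    have ha : PySem.Str.startswith a "# " = false := hpre a (by simp)
    rw [List.cons_append]
    show pvParse (a :: (pre ++ ls)) h b = _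
    rw [pvParse, if_neg (by simp only [ha]; decide),
      ih ls h (b ++ [a]) (fun l hl => hpre l (by simp [hl]))]
    simp

theorem pvParse_eq_single (ls : List String) (h : Option String) (b : List String)
    (hns : ∀ l ∈ ls, PySem.Str.startswith l "# " = false) :
    pvParse ls h b = [(h, b ++ ls)] := by
  have := pvParse_append_noHdr ls [] h b hns
  rwa [List.append_nil] at this

-- ---- prefix sums vs A's budget machinery ----

theorem pvSums_nil (c : Int) : pvSums [] c = [] := rfl

theorem pvSums_cons (l : String) (ls : List String) (c : Int) :
    pvSums (l :: ls) c =
      (c + (PySem.Str.len l + 1)) :: pvSums ls (c + (PySem.Str.len l + 1)) := rfl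

theorem pvLen_nonneg (l : String) : 0 ≤ PySem.Str.len l := by
  rw [PySem.Str.len_eq]; positivity

theorem pvSums_gt (ls : List String) : ∀ (c : Int) (v : Int), v ∈ pvSums ls c → c < v := by
  induction ls with
  | nil => intro c v hv; rw [pvSums_nil] at hv; simp at hv
  | cons l ls ih =>
    intro c v hv
    have hlen := pvLen_nonneg l
    rw [pvSums_cons] at hv
    rcases List.mem_cons.mp hv with h1 | h1
    · omega
    · have := ih _ _ h1; omega

theorem pvKeepA_take (m : Int) (ls : List String) : ∀ (c : Int),
    ls.take (List.countP (fun v => decide (v ≤ m)) (pvSums ls c)) = pvKeepA ls c m := by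
  induction ls with
  | nil => intro c; rfl
  | cons l ls ih =>
    intro c
    have hc : c + (PySem.Str.len l + 1) = c + PySem.Str.len l + 1 := by ring
    rw [pvSums_cons, pvKeepA, List.countP_cons]
    by_cases h : c + PySem.Str.len l + 1 > m
    · rw [if_pos h]
      have h0 : List.countP (fun v => decide (v ≤ m))
          (pvSums ls (c + (PySem.Str.len l + 1))) = 0 := by
        rw [List.countP_eq_zero]
        intro v hv
        have := pvSums_gt ls _ v hv
        simp only [decide_eq_true_eq]
        omega
      have h1 : (decide (c + (PySem.Str.len l + 1) ≤ m)) = false := by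
        simp only [decide_eq_false_iff_not]
        omega
      rw [h0, h1]
      simp
    · rw [if_neg h]
      have h1 : (decide (c + (PySem.Str.len l + 1) ≤ m)) = true := by
        simp only [decide_eq_true_eq]; omega
      rw [h1, if_pos rfl, List.take_succ_cons, hc, ih]

theorem pvSums_last : ∀ (ls : List String) (x : String) (c : Int),
    (pvSums (x :: ls) c).getLast? =
      some (c + ((x :: ls).map (fun l => PySem.Str.len l + 1)).sum) := by
  intro ls
  induction ls with
  | nil =>
    intro x c
    simp only [pvSums_cons, pvSums_nil, List.getLast?_singleton, List.map_cons,
      List.map_nil, List.sum_cons, List.sum_nil, add_zero]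
  | cons y ys ih =>
    intro x c
    rw [pvSums_cons x (y :: ys) c, pvSums_cons y ys _, List.getLast?_cons_cons,
      ← pvSums_cons y ys _, ih y _]
    congr 1
    simp only [List.map_cons, List.sum_cons]
    ring

theorem pvJoin_len_cons : ∀ (ls : List String) (x : String),
    PySem.Str.len (PySem.Str.join "\n" (x :: ls)) =
      ((x :: ls).map (fun l => PySem.Str.len l + 1)).sum - 1 := by
  intro ls
  induction ls with
  | nil =>
    intro x
    rw [PySem.Str.len_eq, PySem.Str.toList_join]
    simp only [List.map_cons, List.map_nil]
    rw [PySem.Chars.join_singleton]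
    simp only [List.sum_cons, List.sum_nil]
    rw [PySem.Str.len_eq]
    ring
  | cons y ys ih =>
    intro x
    have hy := ih y
    rw [PySem.Str.len_eq, PySem.Str.toList_join] at hy ⊢
    simp only [List.map_cons] at hy ⊢
    rw [PySem.Chars.join_cons_cons]
    simp only [List.length_append, List.sum_cons,
      show ("\n".toList : List Char) = ['\n'] from rfl,
      show (['\n'] : List Char).length = 1 from rfl]
    rw [PySem.Str.len_eq x]
    simp only [List.sum_cons] at hy
    push_cast at hy ⊢
    omega

theorem pvTotal_eq (body : List String) :
    (match (pvSums body 0).getLast? with | some v => v - 1 | none => 0) =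
      PySem.Str.len (PySem.Str.join "\n" body) := by
  cases body with
  | nil =>
    rw [pvSums_nil]
    rw [PySem.Str.len_eq, PySem.Str.toList_join]
    simp [PySem.Chars.join_nil]
  | cons x ls =>
    rw [pvSums_last ls x 0, pvJoin_len_cons ls x]
    simp

theorem pvKeep_slice (m : Int) (body : List String) :
    PySem.List.slice body (some 0)
        (some ((pvSums body 0).map (fun v => if v ≤ m then (1 : Int) else 0)).sum) =
      pvKeepA body 0 m := by
  have hsum : ((pvSums body 0).map (fun v => if v ≤ m then (1 : Int) else 0)).sum =
      ((List.countP (fun v => decide (v ≤ m)) (pvSums body 0) : Nat) : Int) := by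
    have hfun : (fun v : Int => if v ≤ m then (1 : Int) else 0) =
        (fun v : Int => if (decide (v ≤ m)) = true then (1 : Int) else 0) := by
      funext v; simp
    rw [hfun, PySem.List.sum_map_ite_one_zero]
  rw [hsum, PySem.List.slice_zero_start, PySem.List.slice_to_natCast]
  exact pvKeepA_take m body 0

-- the per-section branch of B's loop computes exactly pvEmit on (some hd, body)
theorem pvEmit_step (m : Int) (hd : String) (body : List String) (out : List String) (t : Bool) :
    (if (match (pvSums body 0).getLast? with | some v => v - 1 | none => 0) ≤ m
      then (out ++ hd :: body, t)
      else (out ++ hd :: (PySem.List.slice body (some 0)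
              (some ((pvSums body 0).map (fun v => if v ≤ m then (1 : Int) else 0)).sum) ++
            ["\n[... section truncated for length ...]"]), true))
    = pvEmit m (out, t) (some hd, body) := by
  rw [pvTotal_eq, pvKeep_slice]
  rfl

-- slicing with both bounds shifted by a prefix length slices the suffix
theorem pvSlice_shift (q tl : List String) (a b : Int) (ha : 0 ≤ a) (hb : 0 ≤ b) :
    PySem.List.slice (q ++ tl) (some ((q.length : Int) + a)) (some ((q.length : Int) + b)) =
      PySem.List.slice tl (some a) (some b) := by
  rw [PySem.List.slice_toNat _ (by omega) (by omega), PySem.List.slice_toNat _ ha hb]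
  have h1 : ((q.length : Int) + a).toNat = q.length + a.toNat := by omega
  have h2 : ((q.length : Int) + b).toNat = q.length + b.toNat := by omega
  rw [h1, h2, List.drop_append]
  have h3 : List.drop (q.length + a.toNat) q = [] := List.drop_eq_nil_of_le (by omega)
  have h4 : q.length + a.toNat - q.length = a.toNat := by omega
  have h5 : q.length + b.toNat - (q.length + a.toNat) = b.toNat - a.toNat := by omega
  rw [h3, h4, h5, List.nil_append]

-- one-step equation for B's per-mark loop, with the next boundary given explicitly
theorem pvSecLoop_cons_eq (lines : List String) (n m s e : Int) (header : String)
    (rest : List (Int × String)) (out : List String) (t : Bool)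
    (he : (match rest with | [] => n | (e', _) :: _ => e') = e) :
    pvSecLoop lines n m ((s, header) :: rest) out t =
      (if (match (pvSums (PySem.List.slice lines (some (s + 1)) (some e)) 0).getLast? with
            | some v => v - 1 | none => 0) ≤ m then
        pvSecLoop lines n m rest
          (out ++ header :: PySem.List.slice lines (some (s + 1)) (some e)) t
      else
        pvSecLoop lines n m rest
          (out ++ header :: (PySem.List.slice
              (PySem.List.slice lines (some (s + 1)) (some e)) (some 0)
              (some ((pvSums (PySem.List.slice lines (some (s + 1)) (some e)) 0).map
                (fun v => if v ≤ m then (1 : Int) else 0)).sum) ++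
            ["\n[... section truncated for length ...]"])) true) := by
  subst he; rfl

theorem pvSecLoop_shift (m : Int) (q tl : List String) :
    ∀ (ms : List (Int × String)) (out : List String) (t : Bool),
    (∀ p ∈ ms, 0 ≤ p.1) →
    pvSecLoop (q ++ tl) ((q.length : Int) + (tl.length : Int)) m
        (pvShift (q.length : Int) ms) out t =
      pvSecLoop tl (tl.length : Int) m ms out t := by
  intro ms
  induction ms with
  | nil => intro out t _; rfl
  | cons p rest ih =>
    intro out t hms
    obtain ⟨s, h⟩ := p
    have hs : 0 ≤ s := hms (s, h) (by simp)
    have hrest : ∀ p ∈ rest, 0 ≤ p.1 := fun p hp => hms p (by simp [hp])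
    rw [pvShift_cons]
    cases rest with
    | nil =>
      have hb : PySem.List.slice (q ++ tl) (some ((s, h).1 + (q.length : Int) + 1))
          (some ((q.length : Int) + (tl.length : Int))) =
          PySem.List.slice tl (some (s + 1)) (some (tl.length : Int)) := by
        have := pvSlice_shift q tl (s + 1) (tl.length : Int) (by omega) (by omega)
        rw [← this]; congr 2; ring
      rw [pvSecLoop_cons_eq _ _ _ _ ((q.length : Int) + (tl.length : Int)) _ _ _ _ rfl,
        pvSecLoop_cons_eq tl _ _ _ (tl.length : Int) _ _ _ _ rfl, hb]
      split_ifs <;> rfl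
    | cons p2 rest2 =>
      obtain ⟨e0, h2⟩ := p2
      have he0 : 0 ≤ e0 := hrest (e0, h2) (by simp)
      have hb : PySem.List.slice (q ++ tl) (some ((s, h).1 + (q.length : Int) + 1))
          (some ((e0, h2).1 + (q.length : Int))) =
          PySem.List.slice tl (some (s + 1)) (some e0) := by
        have := pvSlice_shift q tl (s + 1) e0 (by omega) he0
        rw [← this]; congr 2 <;> ring
      rw [pvShift_cons]
      rw [pvSecLoop_cons_eq _ _ _ _ ((e0, h2).1 + (q.length : Int)) _ _ _ _ rfl,
        pvSecLoop_cons_eq tl _ _ _ e0 _ _ _ _ rfl, hb]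
      have hih : ∀ (o : List String) (b : Bool),
          pvSecLoop (q ++ tl) ((q.length : Int) + (tl.length : Int)) m
            (((e0, h2).1 + (q.length : Int), (e0, h2).2) :: pvShift (q.length : Int) rest2) o b =
          pvSecLoop tl (tl.length : Int) m ((e0, h2) :: rest2) o b := by
        intro o b
        have := ih o b hrest
        rwa [pvShift_cons] at this
      split_ifs
      · exact hih _ _
      · exact hih _ _

-- head of dropWhile fails the predicate
theorem pvDropWhile_head {α : Type} (p : α → Bool) :
    ∀ (l : List α) (x : α) (xs : List α), l.dropWhile p = x :: xs → p x = false := by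
  intro l
  induction l with
  | nil => intro x xs h; simp [List.dropWhile] at h
  | cons a l ih =>
    intro x xs h
    rw [List.dropWhile_cons] at h
    split_ifs at h with hp
    · exact ih x xs h
    · injection h with h1 _; subst h1; simpa using hp

-- ---- the main B-side lemma: the per-mark loop, started at a header line,
--      is the fold of pvEmit over the parse of the lines after the header ----
theorem pvSec_eq (m : Int) : ∀ (N : Nat) (tl : List String), tl.length = N →
    ∀ (hd : String) (out : List String) (t : Bool),
    pvSecLoop (hd :: tl) (((hd :: tl).length : Int)) m
        ((0, hd) :: pvShift 1 (pvMarksFrom tl 0)) out t =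
      (pvParse tl (some hd) []).foldl (pvEmit m) (out, t) := by
  intro N
  induction N using Nat.strong_induction_on with
  | _ N ihN =>
    intro tl htlN hd out t
    cases hr : tl.dropWhile (fun l => !PySem.Str.startswith l "# ") with
    | nil =>
      have htk : tl.takeWhile (fun l => !PySem.Str.startswith l "# ") = tl := by
        have h := List.takeWhile_append_dropWhile
          (p := fun l => !PySem.Str.startswith l "# ") (l := tl)
        rwa [hr, List.append_nil] at h
      have hAll : ∀ l ∈ tl, PySem.Str.startswith l "# " = false := by
        intro l hl
        rw [← htk] at hl
        exact pvBoolAux (List.mem_takeWhile_imp (p := fun s => !PySem.Str.startswith s "# ") hl)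
      rw [pvMarksFrom_eq_nil tl 0 hAll, pvShift_nil,
        pvSecLoop_cons_eq _ _ _ _ (((hd :: tl).length : Int)) _ _ _ _ rfl]
      have hb : PySem.List.slice (hd :: tl) (some ((0 : Int) + 1))
          (some (((hd :: tl).length : Int))) = tl := by
        rw [PySem.List.slice_toNat _ (by omega) (by omega)]
        have h1 : ((0 : Int) + 1).toNat = 1 := by decide
        have h2 : ((((hd :: tl).length : Nat) : Int)).toNat = tl.length + 1 := by
          simp [List.length_cons]
        rw [h1, h2]
        simp only [List.drop_succ_cons, List.drop_zero, Nat.add_sub_cancel, List.take_length]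
      rw [hb, pvParse_eq_single tl (some hd) [] hAll, List.nil_append]
      exact pvEmit_step m hd tl out t
    | cons h2 tl2 =>
      have htl_eq : tl.takeWhile (fun l => !PySem.Str.startswith l "# ") ++ h2 :: tl2 = tl := by
        have h := List.takeWhile_append_dropWhile
          (p := fun l => !PySem.Str.startswith l "# ") (l := tl)
        rwa [hr] at h
      set pre := tl.takeWhile (fun l => !PySem.Str.startswith l "# ") with hpre_def
      have hpre : ∀ l ∈ pre, PySem.Str.startswith l "# " = false := by
        intro l hl
        exact pvBoolAux (List.mem_takeWhile_imp (p := fun s => !PySem.Str.startswith s "# ") hl)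
      have hP2 : PySem.Str.startswith h2 "# " = true := by
        exact pvBoolAux2 (pvDropWhile_head (fun l => !PySem.Str.startswith l "# ") tl h2 tl2 hr)
      have hlensum : pre.length + (tl2.length + 1) = tl.length := by
        rw [← htl_eq]; simp
      have hN2 : tl2.length < N := by omega
      -- marks of tl
      have hmarks : pvMarksFrom tl 0 =
          ((pre.length : Int), h2) :: pvShift ((pre.length : Int) + 1) (pvMarksFrom tl2 0) := by
        rw [← htl_eq, pvMarksFrom_append_noHdr pre (h2 :: tl2) 0 hpre, pvMarksFrom_cons,
          if_pos hP2]
        simp only [zero_add]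
        congr 1
        exact pvMarksFrom_shift0 tl2 _
      -- the body of the first section is pre
      have hb : PySem.List.slice (hd :: tl) (some ((0 : Int) + 1))
          (some ((pre.length : Int) + 1)) = pre := by
        rw [PySem.List.slice_toNat _ (by omega) (by omega)]
        have h1 : ((0 : Int) + 1).toNat = 1 := by decide
        have h2' : (((pre.length : Nat) : Int) + 1).toNat = pre.length + 1 := by omega
        rw [h1, h2', List.drop_succ_cons, List.drop_zero, Nat.add_sub_cancel, ← htl_eq,
          List.take_left]
      -- the continuation after the first section
      have hF : ∀ (o : List String) (b : Bool),
          pvSecLoop (hd :: tl) (((hd :: tl).length : Int)) m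
            (((pre.length : Int) + 1, h2) :: pvShift ((pre.length : Int) + 1 + 1)
              (pvMarksFrom tl2 0)) o b =
          (pvParse tl2 (some h2) []).foldl (pvEmit m) (o, b) := by
        intro o b
        have hnn : ∀ p ∈ ((0 : Int), h2) :: pvShift 1 (pvMarksFrom tl2 0), 0 ≤ p.1 := by
          intro p hp
          rcases List.mem_cons.mp hp with h | h
          · subst h; simp
          · simp only [pvShift, List.mem_map] at h
            obtain ⟨qq, hq, rfl⟩ := h
            have := pvMarksFrom_nonneg tl2 0 qq hq
            simp only []
            omega
        have hsh := pvSecLoop_shift m (hd :: pre) (h2 :: tl2)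
          (((0 : Int), h2) :: pvShift 1 (pvMarksFrom tl2 0)) o b hnn
        have hlines : (hd :: pre) ++ h2 :: tl2 = hd :: tl := by
          rw [List.cons_append, htl_eq]
        have hq : (((hd :: pre).length : Nat) : Int) = (pre.length : Int) + 1 := by
          simp
        rw [hlines, pvShift_cons, pvShift_shift, hq] at hsh
        have e1 : ((0 : Int), h2).1 + ((pre.length : Int) + 1) = (pre.length : Int) + 1 := by
          simp
        have e2 : (1 : Int) + ((pre.length : Int) + 1) = (pre.length : Int) + 1 + 1 := by ring
        rw [e1, e2] at hsh
        have hn : (((hd :: tl).length : Nat) : Int) =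
            ((pre.length : Int) + 1) + (((h2 :: tl2).length : Nat) : Int) := by
          rw [← htl_eq]
          push_cast [List.length_cons, List.length_append]
          ring
        rw [hn]
        exact hsh.trans (ihN tl2.length hN2 tl2 rfl h2 o b)
      -- assemble
      rw [hmarks, pvShift_cons, pvShift_shift]
      have e3 : ((pre.length : Int), h2).1 + 1 = (pre.length : Int) + 1 := rfl
      have e4 : ((pre.length : Int) + 1) + 1 = (pre.length : Int) + 1 + 1 := rfl
      rw [e3, e4]
      rw [pvSecLoop_cons_eq _ _ _ _ ((pre.length : Int) + 1) _ _ _ _ rfl, hb]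
      rw [hF, hF]
      have hparse : pvParse tl (some hd) [] =
          (some hd, pre) :: pvParse tl2 (some h2) [] := by
        rw [← htl_eq, pvParse_append_noHdr pre (h2 :: tl2) (some hd) [] hpre, List.nil_append]
        show pvParse (h2 :: tl2) (some hd) pre = _
        rw [pvParse, if_pos hP2]
      rw [hparse, List.foldl_cons, ← pvEmit_step m hd pre out t]
      exact (apply_ite
        (fun s : List String × Bool =>
          (pvParse tl2 (some h2) []).foldl (pvEmit m) s) _ _ _).symm

-- B's whole computation is the same fold, starting from the preamble
theorem pvB_eq (m : Int) (lines : List String) :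
    pvSecLoop lines ((lines.length : Int)) m (pvMarksFrom lines 0)
        (match pvMarksFrom lines 0 with
          | [] => lines
          | (s, _) :: _ => PySem.List.slice lines (some 0) (some s)) false
      = (pvParse lines none []).foldl (pvEmit m) ([], false) := by
  cases hr : lines.dropWhile (fun l => !PySem.Str.startswith l "# ") with
  | nil =>
    have htk : lines.takeWhile (fun l => !PySem.Str.startswith l "# ") = lines := by
      have h := List.takeWhile_append_dropWhile
        (p := fun l => !PySem.Str.startswith l "# ") (l := lines)
      rwa [hr, List.append_nil] at h
    have hAll : ∀ l ∈ lines, PySem.Str.startswith l "# " = false := by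
      intro l hl
      rw [← htk] at hl
      exact pvBoolAux (List.mem_takeWhile_imp (p := fun s => !PySem.Str.startswith s "# ") hl)
    rw [pvMarksFrom_eq_nil lines 0 hAll, pvParse_eq_single lines none [] hAll, List.nil_append]
    simp [pvSecLoop, pvEmit]
  | cons h2 tl2 =>
    have htl_eq : lines.takeWhile (fun l => !PySem.Str.startswith l "# ") ++ h2 :: tl2 = lines := by
      have h := List.takeWhile_append_dropWhile
        (p := fun l => !PySem.Str.startswith l "# ") (l := lines)
      rwa [hr] at h
    set pre := lines.takeWhile (fun l => !PySem.Str.startswith l "# ") with hpre_def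
    have hpre : ∀ l ∈ pre, PySem.Str.startswith l "# " = false := by
      intro l hl
      exact pvBoolAux (List.mem_takeWhile_imp (p := fun s => !PySem.Str.startswith s "# ") hl)
    have hP2 : PySem.Str.startswith h2 "# " = true := by
      exact pvBoolAux2 (pvDropWhile_head (fun l => !PySem.Str.startswith l "# ") lines h2 tl2 hr)
    have hmarks : pvMarksFrom lines 0 =
        ((pre.length : Int), h2) :: pvShift ((pre.length : Int) + 1) (pvMarksFrom tl2 0) := by
      rw [← htl_eq, pvMarksFrom_append_noHdr pre (h2 :: tl2) 0 hpre, pvMarksFrom_cons,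
        if_pos hP2]
      simp only [zero_add]
      congr 1
      exact pvMarksFrom_shift0 tl2 _
    rw [hmarks]
    -- the preamble slice
    have hout0 : PySem.List.slice lines (some 0) (some ((pre.length : Int))) = pre := by
      rw [PySem.List.slice_zero_start, PySem.List.slice_to_natCast, ← htl_eq, List.take_left]
    show pvSecLoop lines ((lines.length : Int)) m _
        (PySem.List.slice lines (some 0) (some ((pre.length : Int)))) false = _
    rw [hout0]
    -- shift by the preamble, then run pvSec_eq
    have hnn : ∀ p ∈ ((0 : Int), h2) :: pvShift 1 (pvMarksFrom tl2 0), 0 ≤ p.1 := by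
      intro p hp
      rcases List.mem_cons.mp hp with h | h
      · subst h; simp
      · simp only [pvShift, List.mem_map] at h
        obtain ⟨qq, hq, rfl⟩ := h
        have := pvMarksFrom_nonneg tl2 0 qq hq
        simp only []
        omega
    have hsh := pvSecLoop_shift m pre (h2 :: tl2)
      (((0 : Int), h2) :: pvShift 1 (pvMarksFrom tl2 0)) pre false hnn
    rw [htl_eq, pvShift_cons, pvShift_shift] at hsh
    have e1 : ((0 : Int), h2).1 + (pre.length : Int) = (pre.length : Int) := by simp
    have e2 : (1 : Int) + (pre.length : Int) = (pre.length : Int) + 1 := by ring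
    rw [e1, e2] at hsh
    have hn : ((lines.length : Nat) : Int) =
        ((pre.length : Int)) + (((h2 :: tl2).length : Nat) : Int) := by
      rw [← htl_eq]
      push_cast [List.length_cons, List.length_append]
      ring
    rw [hn]
    rw [hsh]
    rw [pvSec_eq m tl2.length tl2 rfl h2 pre false]
    -- now the A-side fold
    have hparse : pvParse lines none [] = (none, pre) :: pvParse tl2 (some h2) [] := by
      rw [← htl_eq, pvParse_append_noHdr pre (h2 :: tl2) none [] hpre, List.nil_append]
      show pvParse (h2 :: tl2) none pre = _
      rw [pvParse, if_pos hP2]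
    rw [hparse, List.foldl_cons]
    have hinit : pvEmit m ([], false) (none, pre) = (pre, false) := by
      simp [pvEmit]
    rw [hinit]

-- ===== VERDICT (by name: the statement is the Claim_ definition above) =====
theorem truncate_session_memory_for_compact_spec : Claim_equal_truncate_session_memory_for_compact := by
  intro content _
  show _ = _
  simp only [truncate_session_memory_for_compact, truncate_session_memory_for_compact_alt]
  rw [pvLoop_eq, pvMarks_eq_from, pvB_eq]
  rfl
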